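-- pv_equiv track=rewrite | github.com/Paper10/Algorism | 20231013.py | solution
-- ===== SOURCE A (Python) =====
-- def solution(strs, t):
--     memo = {}  # 중복 계산을 피하기 위한 메모이제이션을 위한 딕셔너리
--
--     def find(arr):
--         if arr in memo:  # 이미 계산된 값이 있는 경우 바로 반환
--             return memo[arr]
--
--         if arr in strs:  # 목표 문자열에 포함되는 경우 1 반환
--             memo[arr] = 1
--             return 1
--
--         min_count = float('inf')  # 최소값을 찾기 위해 무한대로 초기화
--
--         for i in range(1, len(arr) + 1):
--             suffix = arr[-i:]  # 문자열 끝에서부터 접두사를 추출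
--             if suffix in strs:
--                 prefix = arr[:len(arr) - i]  # 접두사 이전 부분
--                 count = find(prefix)  # 접두사 이전 부분에서의 최소값 계산
--                 if count != 0:
--                     min_count = min(min_count, 1 + count)
--
--         if min_count == float('inf'):  # 접두사 이전 부분에서의 최소값을 찾지 못한 경우
--             memo[arr] = 0
--         else:
--             memo[arr] = min_count
--
--         return memo[arr]
--
--     answer = find(t)
--     return answer if answer != 0 else -1
-- ===== SOURCE B (Python) =====
-- def solution(strs, t):
--     n = len(t)
--     if n == 0:
--         return 1 if "" in strs else -1
--     dp = [None] * (n + 1)  # dp[j] = min words concatenating to t[:j], None = impossible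
--     dp[0] = 0
--     for i in range(1, n + 1):
--         best = None
--         for w in strs:
--             lw = len(w)
--             if 0 < lw <= i and t[i - lw:i] == w and dp[i - lw] is not None:
--                 c = dp[i - lw] + 1
--                 if best is None or c < best:
--                     best = c
--         dp[i] = best
--     return dp[n] if dp[n] is not None else -1
-- ===== Notes on version B (the rewrite author's own statement) =====
-- stated objective: faster
-- what changed: A's memoised top-down recursion over all suffix splits (with a 0-as-failure sentinel threaded through a memo dict) is replaced by an iterative bottom-up DP over prefix lengths of t that tries each dictionary word at each position.
import Mathlib
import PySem

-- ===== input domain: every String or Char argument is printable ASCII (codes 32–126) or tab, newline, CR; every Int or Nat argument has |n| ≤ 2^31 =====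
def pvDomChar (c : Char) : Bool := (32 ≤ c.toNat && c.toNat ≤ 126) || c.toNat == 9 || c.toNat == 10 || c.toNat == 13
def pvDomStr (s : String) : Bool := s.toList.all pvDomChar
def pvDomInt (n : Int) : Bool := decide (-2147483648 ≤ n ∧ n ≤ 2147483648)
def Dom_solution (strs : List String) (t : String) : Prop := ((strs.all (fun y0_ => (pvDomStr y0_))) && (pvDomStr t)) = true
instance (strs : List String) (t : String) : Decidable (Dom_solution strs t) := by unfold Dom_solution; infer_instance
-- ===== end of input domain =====

-- B replaces A's memoised top-down recursion over all suffix splits by an iterative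
-- bottom-up DP over prefix lengths of t trying each word per position (objective: faster,
-- measured).

-- ===== PORT A =====
-- A works on strings; per the PySem convention the helpers work on List Char
-- (Python '==' / 'in' on str is exactly equality / membership of the char lists).
-- def find(arr): memoised recursion, the memo dict threaded through; the for-loop
-- over range(1, len(arr)+1) is the foldl over PySem.List.pyRange. `fuel` is a
-- totality guard only: every recursive call is on a strictly shorter string, and
-- solution passes fuel = len(t)+1, so the fuel-0 default is never reached.
def findA (ws : List (List Char)) (fuel : Nat) (arr : List Char)
    (memo : PySem.Dict (List Char) Int) : Int × PySem.Dict (List Char) Int :=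
  match fuel with
  | 0 => (0, memo)
  | fuel + 1 =>
    match memo.get? arr with
    | some v => (v, memo)                              -- if arr in memo: return memo[arr]
    | none =>
      if ws.contains arr then (1, memo.insert arr 1)   -- if arr in strs: memo[arr] = 1; return 1
      else
        -- min_count = inf (none); for i in range(1, len(arr)+1): …
        let r := (PySem.List.pyRange 1 ((arr.length : Int) + 1)).foldl
          (fun st i =>
            let suffix := PySem.List.slice arr (some (-i)) none        -- arr[-i:]
            if ws.contains suffix then
              let fr := findA ws fuel
                (PySem.List.slice arr none (some ((arr.length : Int) - i))) st.2  -- find(arr[:len(arr)-i])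
              (if fr.1 ≠ 0 then                        -- if count != 0: min_count = min(min_count, 1+count)
                  some (match st.1 with | none => 1 + fr.1 | some m => min m (1 + fr.1))
                else st.1, fr.2)
            else st)
          ((none : Option Int), memo)
        match r.1 with
        | none => (0, r.2.insert arr 0)                -- min_count == inf: memo[arr] = 0
        | some m => (m, r.2.insert arr m)              -- else: memo[arr] = min_count

def solution (strs : List String) (t : String) : Int :=
  let ws := strs.map String.toList
  let answer := (findA ws (t.toList.length + 1) t.toList PySem.Dict.empty).1   -- answer = find(t)
  if answer ≠ 0 then answer else -1                    -- return answer if answer != 0 else -1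

-- ===== PORT B =====
-- inner loop of Source B: best over all words w matching t[i-lw:i] with dp[i-lw] set
def innerB (ws : List (List Char)) (s : List Char) (dp : List (Option Int)) (i : Nat) : Option Int :=
  ws.foldl (fun best w =>
    let lw := w.length
    if 0 < lw ∧ lw ≤ i then
      if PySem.List.slice s (some ((i : Int) - (lw : Int))) (some (i : Int)) = w then  -- t[i-lw:i] == w
        match dp.getD (i - lw) none with               -- dp[i-lw] is not None  (index always < len dp here)
        | some d =>
          let c := d + 1
          match best with
          | none => some c
          | some b => if c < b then some c else some b
        | none => best
      else best
    else best) none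

-- dp built left to right: dp[j] = min words concatenating to t[:j], none = impossible
def dpB (ws : List (List Char)) (s : List Char) : List (Option Int) :=
  (List.range' 1 s.length).foldl (fun dp i => dp ++ [innerB ws s dp i]) [some 0]

def solution_alt (strs : List String) (t : String) : Int :=
  let ws := strs.map String.toList
  let s := t.toList
  if s.length = 0 then (if ws.contains [] then 1 else -1)
  else
    match (dpB ws s).getD s.length none with
    | none => -1
    | some v => v

-- ===== PRECONDITION & SPEC =====
def Spec_solution (strs : List String) (t : String) (out : Int) : Prop := out = solution_alt strs t
instance (strs : List String) (t : String) (out : Int) : Decidable (Spec_solution strs t out) := by unfold Spec_solution; infer_instance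

-- ===== CLAIM (what is proved, stated in full; the proofs are below) =====
def Claim_equal_solution : Prop := ∀ (strs : List String) (t : String), Dom_solution strs t → Spec_solution strs t (solution strs t)

-- ===== LEMMAS AND PROOFS =====

-- "min with none = +inf" accumulator
def fmin (b : Option Int) (c : Int) : Option Int :=
  some (match b with | none => c | some m => min m c)

-- pure (memo-free) denotation of A's find, same recursion shape
def findP (ws : List (List Char)) (fuel : Nat) (arr : List Char) : Int :=
  match fuel with
  | 0 => 0
  | fuel + 1 =>
    if ws.contains arr then 1
    else
      match (PySem.List.pyRange 1 ((arr.length : Int) + 1)).foldl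
          (fun mc i =>
            if ws.contains (PySem.List.slice arr (some (-i)) none) then
              let c := findP ws fuel (PySem.List.slice arr none (some ((arr.length : Int) - i)))
              if c ≠ 0 then fmin mc (1 + c) else mc
            else mc)
          (none : Option Int) with
      | none => 0
      | some m => m

-- length of the prefix slice arr[:len(arr)-i]
lemma prefLen (arr : List Char) (i : Int) (h1 : 1 ≤ i) (h2 : i ≤ arr.length) :
    (PySem.List.slice arr none (some ((arr.length : Int) - i))).length = arr.length - i.toNat := by
  rw [PySem.List.slice_to arr (by omega)]
  rw [List.length_take]
  omega

lemma findP_stable (ws : List (List Char)) :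
    ∀ n fuel fuel' (arr : List Char), arr.length = n → arr.length < fuel → arr.length < fuel' →
      findP ws fuel arr = findP ws fuel' arr := by
  intro n
  induction n using Nat.strong_induction_on with
  | _ n IH =>
  intro fuel fuel' arr hn hf hf'
  match fuel, fuel' with
  | f + 1, f' + 1 =>
    rw [findP, findP]
    by_cases hc : ws.contains arr
    · rw [if_pos hc, if_pos hc]
    · rw [if_neg hc, if_neg hc]
      have hbody : ∀ (mc : Option Int), ∀ i ∈ PySem.List.pyRange 1 ((arr.length : Int) + 1),
          (if ws.contains (PySem.List.slice arr (some (-i)) none) then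
            (let c := findP ws f (PySem.List.slice arr none (some ((arr.length : Int) - i)))
             if c ≠ 0 then fmin mc (1 + c) else mc)
           else mc)
          = (if ws.contains (PySem.List.slice arr (some (-i)) none) then
            (let c := findP ws f' (PySem.List.slice arr none (some ((arr.length : Int) - i)))
             if c ≠ 0 then fmin mc (1 + c) else mc)
           else mc) := by
        intro mc i hi
        rw [PySem.List.mem_pyRange_one] at hi
        have hpl : (PySem.List.slice arr none (some ((arr.length : Int) - i))).length
            = arr.length - i.toNat := prefLen arr i hi.1 (by omega)
        have heq : findP ws f (PySem.List.slice arr none (some ((arr.length : Int) - i)))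
            = findP ws f' (PySem.List.slice arr none (some ((arr.length : Int) - i))) := by
          exact IH (arr.length - i.toNat) (by omega) f f' _ (by rw [hpl]) (by omega) (by omega)
        rw [heq]
      rw [PySem.List.foldl_congr_mem _ _ _ _ (hbody)]

-- the fuel-independent value of A's find
def Fv (ws : List (List Char)) (arr : List Char) : Int := findP ws (arr.length + 1) arr

-- candidate produced by A's loop at Python index i
def candA (ws : List (List Char)) (arr : List Char) (i : Int) : Option Int :=
  if ws.contains (PySem.List.slice arr (some (-i)) none)
      ∧ Fv ws (PySem.List.slice arr none (some ((arr.length : Int) - i))) ≠ 0 then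
    some (1 + Fv ws (PySem.List.slice arr none (some ((arr.length : Int) - i))))
  else none

lemma min?_fmin_toList (mc : Option Int) (c : Int) (L : List Int) :
    ((fmin mc c).toList ++ L).min? = (mc.toList ++ c :: L).min? := by
  cases mc with
  | none => simp [fmin]
  | some m =>
    simp only [fmin, Option.toList_some, List.cons_append,
      List.min?_cons', List.nil_append, List.foldl_cons]

lemma foldl_fmin_min? {α : Type} (f : α → Option Int) (l : List α) (acc : Option Int) :
    l.foldl (fun b a => match f a with | none => b | some c => fmin b c) acc
      = (acc.toList ++ l.filterMap f).min? := by
  induction l generalizing acc with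
  | nil => cases acc <;> simp [List.min?]
  | cons a l ih =>
    simp only [List.foldl_cons, List.filterMap_cons]
    cases hfa : f a with
    | none => exact ih acc
    | some c => rw [ih, min?_fmin_toList]

lemma min?_congr_mem (l1 l2 : List Int) (h : ∀ v, v ∈ l1 ↔ v ∈ l2) : l1.min? = l2.min? := by
  cases h1 : l1.min? with
  | none =>
    rw [List.min?_eq_none_iff] at h1
    subst h1
    rcases l2 with _ | ⟨a, l2⟩
    · rfl
    · exact absurd ((h a).2 List.mem_cons_self) (by simp)
  | some m =>
    rw [List.min?_eq_some_iff] at h1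
    rw [eq_comm, List.min?_eq_some_iff]
    exact ⟨(h m).1 h1.1, fun b hb => h1.2 b ((h b).2 hb)⟩

-- A's loop (pure form) computes the min of its candidate values
lemma findP_loop_eq (ws : List (List Char)) (arr : List Char) (fuel : Nat)
    (hf : arr.length ≤ fuel) :
    (PySem.List.pyRange 1 ((arr.length : Int) + 1)).foldl
        (fun mc i =>
          if ws.contains (PySem.List.slice arr (some (-i)) none) then
            (let c := findP ws fuel (PySem.List.slice arr none (some ((arr.length : Int) - i)))
             if c ≠ 0 then fmin mc (1 + c) else mc)
          else mc)
        (none : Option Int)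
      = ((PySem.List.pyRange 1 ((arr.length : Int) + 1)).filterMap (candA ws arr)).min? := by
  rw [PySem.List.foldl_congr_mem _ _
    (fun b a => match candA ws arr a with | none => b | some c => fmin b c) _ ?_]
  · rw [foldl_fmin_min?]
    rfl
  · intro mc i hi
    change _ = match candA ws arr i with | none => mc | some c => fmin mc c
    rw [PySem.List.mem_pyRange_one] at hi
    have hpl : (PySem.List.slice arr none (some ((arr.length : Int) - i))).length
        = arr.length - i.toNat := prefLen arr i hi.1 (by omega)
    have hst : findP ws fuel (PySem.List.slice arr none (some ((arr.length : Int) - i)))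
        = Fv ws (PySem.List.slice arr none (some ((arr.length : Int) - i))) :=
      findP_stable ws _ fuel _ _ rfl (by omega) (by omega)
    by_cases hcs : ws.contains (PySem.List.slice arr (some (-i)) none)
    · rw [if_pos hcs]
      simp only [hst]
      by_cases hz : Fv ws (PySem.List.slice arr none (some ((arr.length : Int) - i))) ≠ 0
      · have hcand : candA ws arr i
            = some (1 + Fv ws (PySem.List.slice arr none (some ((arr.length : Int) - i)))) := by
          rw [candA, if_pos ⟨hcs, hz⟩]
        rw [hcand, if_pos hz]
      · have hcand : candA ws arr i = none := by rw [candA, if_neg (by tauto)]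
        rw [hcand, if_neg hz]
    · have hcand : candA ws arr i = none := by rw [candA, if_neg (by tauto)]
      rw [if_neg hcs, hcand]

-- closed characterisation of Fv
lemma Fv_eq (ws : List (List Char)) (arr : List Char) :
    Fv ws arr = if ws.contains arr then 1
      else match ((PySem.List.pyRange 1 ((arr.length : Int) + 1)).filterMap (candA ws arr)).min? with
        | none => 0
        | some m => m := by
  rw [Fv, findP]
  by_cases hc : ws.contains arr
  · rw [if_pos hc, if_pos hc]
  · rw [if_neg hc, if_neg hc, findP_loop_eq ws arr arr.length (le_refl _)]

-- memo invariant: every stored value is the pure value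
def InvM (ws : List (List Char)) (memo : PySem.Dict (List Char) Int) : Prop :=
  ∀ k v, memo.get? k = some v → v = Fv ws k

lemma findA_ok (ws : List (List Char)) :
    ∀ fuel (arr : List Char) (memo : PySem.Dict (List Char) Int),
      arr.length < fuel → InvM ws memo →
      (findA ws fuel arr memo).1 = Fv ws arr ∧ InvM ws (findA ws fuel arr memo).2 := by
  intro fuel
  induction fuel with
  | zero => intro arr memo h; omega
  | succ fuel IH =>
  intro arr memo hlen hInv
  rw [findA]
  cases hget : memo.get? arr with
  | some v => exact ⟨hInv arr v hget, hInv⟩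
  | none =>
    by_cases hcon : ws.contains arr
    · simp only [hcon, if_pos]
      refine ⟨by rw [Fv_eq, if_pos hcon], ?_⟩
      intro key v hkey
      by_cases hka : key = arr
      · rw [PySem.Dict.get?_insert, if_pos hka] at hkey
        cases hkey; subst hka; rw [Fv_eq, if_pos hcon]
      · rw [PySem.Dict.get?_insert, if_neg hka] at hkey
        exact hInv _ _ hkey
    · simp only [Bool.not_eq_true] at hcon
      simp only [hcon, Bool.false_eq_true, if_false]
      -- the loop, with the memo threaded through
      have loopok : ∀ (l : List Int), (∀ i ∈ l, 1 ≤ i ∧ i ≤ (arr.length : Int)) →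
          ∀ (mc : Option Int) (memo : PySem.Dict (List Char) Int), InvM ws memo →
          ((l.foldl
            (fun st i =>
              let suffix := PySem.List.slice arr (some (-i)) none
              if ws.contains suffix then
                let fr := findA ws fuel
                  (PySem.List.slice arr none (some ((arr.length : Int) - i))) st.2
                (if fr.1 ≠ 0 then
                    some (match st.1 with | none => 1 + fr.1 | some m => min m (1 + fr.1))
                  else st.1, fr.2)
              else st)
            (mc, memo)).1 = (mc.toList ++ l.filterMap (candA ws arr)).min?)
          ∧ InvM ws ((l.foldl
            (fun st i =>
              let suffix := PySem.List.slice arr (some (-i)) none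
              if ws.contains suffix then
                let fr := findA ws fuel
                  (PySem.List.slice arr none (some ((arr.length : Int) - i))) st.2
                (if fr.1 ≠ 0 then
                    some (match st.1 with | none => 1 + fr.1 | some m => min m (1 + fr.1))
                  else st.1, fr.2)
              else st)
            (mc, memo)).2) := by
        intro l
        induction l with
        | nil =>
          intro _ mc memo hI
          constructor
          · cases mc <;> simp [List.min?]
          · exact hI
        | cons i l ihl =>
          intro hmem mc memo hI
          obtain ⟨hi1, hi2⟩ := hmem i List.mem_cons_self
          have hsub : ∀ j ∈ l, 1 ≤ j ∧ j ≤ (arr.length : Int) :=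
            fun j hj => hmem j (List.mem_cons_of_mem i hj)
          simp only [List.foldl_cons, List.filterMap_cons]
          by_cases hcs : ws.contains (PySem.List.slice arr (some (-i)) none)
          · simp only [hcs, if_pos]
            have hpl : (PySem.List.slice arr none (some ((arr.length : Int) - i))).length
                = arr.length - i.toNat := prefLen arr i hi1 hi2
            have hf := IH (PySem.List.slice arr none (some ((arr.length : Int) - i))) memo
              (by omega) hI
            rw [hf.1]
            by_cases hz : Fv ws (PySem.List.slice arr none (some ((arr.length : Int) - i))) ≠ 0
            · rw [if_pos hz]
              have hcand : candA ws arr i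
                  = some (1 + Fv ws (PySem.List.slice arr none (some ((arr.length : Int) - i)))) := by
                rw [candA, if_pos ⟨hcs, hz⟩]
              rw [hcand]
              obtain ⟨h1, h2⟩ := ihl hsub
                (some (match mc with
                  | none => 1 + Fv ws (PySem.List.slice arr none (some ((arr.length : Int) - i)))
                  | some m => min m (1 + Fv ws (PySem.List.slice arr none (some ((arr.length : Int) - i))))))
                _ hf.2
              refine ⟨?_, h2⟩
              rw [h1]
              exact min?_fmin_toList mc _ _
            · rw [if_neg hz]
              have hcand : candA ws arr i = none := by rw [candA, if_neg (by tauto)]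
              rw [hcand]
              exact ihl hsub mc _ hf.2
          · simp only [Bool.not_eq_true] at hcs
            simp only [hcs, Bool.false_eq_true, if_false]
            have hcand : candA ws arr i = none := by
              rw [candA, if_neg]
              rintro ⟨h1, -⟩
              rw [hcs] at h1
              exact Bool.false_ne_true h1
            rw [hcand]
            exact ihl hsub mc memo hI
      have hl := loopok (PySem.List.pyRange 1 ((arr.length : Int) + 1))
        (fun i hi => by rw [PySem.List.mem_pyRange_one] at hi; omega) none memo hInv
      have hval : Fv ws arr
          = match ((PySem.List.pyRange 1 ((arr.length : Int) + 1)).filterMap (candA ws arr)).min? with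
            | none => 0 | some m => m := by
        rw [Fv_eq]
        simp only [hcon, Bool.false_eq_true, if_false]
      simp only [Option.toList_none, List.nil_append] at hl
      cases hr : ((PySem.List.pyRange 1 ((arr.length : Int) + 1)).filterMap (candA ws arr)).min? with
      | none =>
        rw [hr] at hl
        rw [hl.1]
        have h0 : Fv ws arr = 0 := by rw [hval, hr]
        refine ⟨h0.symm, ?_⟩
        intro key v hkey
        by_cases hka : key = arr
        · rw [PySem.Dict.get?_insert, if_pos hka] at hkey
          cases hkey; subst hka; exact h0.symm
        · rw [PySem.Dict.get?_insert, if_neg hka] at hkey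
          exact hl.2 _ _ hkey
      | some m =>
        rw [hr] at hl
        rw [hl.1]
        have h0 : Fv ws arr = m := by rw [hval, hr]
        refine ⟨h0.symm, ?_⟩
        intro key v hkey
        by_cases hka : key = arr
        · rw [PySem.Dict.get?_insert, if_pos hka] at hkey
          cases hkey; subst hka; exact h0.symm
        · rw [PySem.Dict.get?_insert, if_neg hka] at hkey
          exact hl.2 _ _ hkey

-- canonical forms of the three slices involved
lemma sufA_eq (s : List Char) (j lw : Nat) (hj : j ≤ s.length) (h1 : 1 ≤ lw) (h2 : lw ≤ j) :
    PySem.List.slice (s.take j) (some (-((lw : Nat) : Int))) none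
      = (s.drop (j - lw)).take lw := by
  rw [PySem.List.slice_from_neg_natCast _ _ (by omega)]
  have hl : (s.take j).length = j := by rw [List.length_take]; omega
  rw [hl, List.drop_take]
  congr 1
  omega

lemma preA_eq (s : List Char) (j lw : Nat) (hj : j ≤ s.length) (h2 : lw ≤ j) :
    PySem.List.slice (s.take j) none (some (((s.take j).length : Int) - ((lw : Nat) : Int)))
      = s.take (j - lw) := by
  have hl : (s.take j).length = j := by rw [List.length_take]; omega
  rw [hl, PySem.List.slice_to _ (by omega)]
  have h2' : ((j : Int) - (lw : Int)).toNat = j - lw := by omega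
  rw [h2', List.take_take]
  congr 1
  omega

lemma sliceB_eq (s : List Char) (j lw : Nat) (hlw : lw ≤ j) :
    PySem.List.slice s (some ((j : Int) - (lw : Int))) (some (j : Int))
      = (s.drop (j - lw)).take (j - (j - lw)) := by
  have h1 : ((j : Int) - (lw : Int)) = ((j - lw : Nat) : Int) := by omega
  rw [h1, PySem.List.slice_natCast]

-- relation between a dp entry and the pure value of A on the same prefix
def RelP (ws : List (List Char)) (s : List Char) (j : Nat) (o : Option Int) : Prop :=
  (o = none ∧ Fv ws (s.take j) = 0) ∨ (∃ m, o = some m ∧ Fv ws (s.take j) = m ∧ 1 ≤ m)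

-- candidate produced by B's inner loop for word w at position i
def candB (s : List Char) (dp : List (Option Int)) (i : Nat) (w : List Char) : Option Int :=
  if 0 < w.length ∧ w.length ≤ i ∧
      PySem.List.slice s (some ((i : Int) - (w.length : Int))) (some (i : Int)) = w then
    (dp.getD (i - w.length) none).map (· + 1)
  else none

lemma innerB_eq (ws : List (List Char)) (s : List Char) (dp : List (Option Int)) (i : Nat) :
    innerB ws s dp i = (ws.filterMap (candB s dp i)).min? := by
  unfold innerB
  rw [PySem.List.foldl_congr_mem ws _
    (fun b a => match candB s dp i a with | none => b | some c => fmin b c) none ?_]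
  · rw [foldl_fmin_min?]
    rfl
  · intro best w _
    simp only [candB]
    by_cases h1 : 0 < w.length ∧ w.length ≤ i
    · by_cases h2 : PySem.List.slice s (some ((i : Int) - (w.length : Int))) (some (i : Int)) = w
      · simp only [h1, h2, if_pos, and_true, true_and, if_pos h1.1, if_pos h1.2]
        cases hd : dp.getD (i - w.length) none with
        | none => simp [h1, h2, hd]
        | some d =>
          simp only [h1, h2, hd, and_self, if_pos, Option.map_some]
          cases best with
          | none => simp [fmin, h1, h2, hd]
          | some b =>
            simp only [fmin]
            by_cases hlt : d + 1 < b
            · rw [if_pos hlt]; congr 1; omega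
            · rw [if_neg hlt]; congr 1; omega
      · simp [h1, h2]
    · simp only [h1, false_and, if_neg, ite_false]
      rw [if_neg (by tauto)]

lemma dp_d_nonneg (ws : List (List Char)) (s : List Char) (dp : List (Option Int)) (i : Nat)
    (h0 : dp.getD 0 none = some 0)
    (hrel : ∀ j, 1 ≤ j → j ≤ i → RelP ws s j (dp.getD j none)) :
    ∀ jj d, jj ≤ i → dp.getD jj none = some d → 0 ≤ d := by
  intro jj d hji hgd
  rcases Nat.eq_zero_or_pos jj with h | h
  · subst h
    rw [h0] at hgd
    injection hgd with h2
    omega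
  · rcases hrel jj h hji with ⟨hn, _⟩ | ⟨m, hm, _, hm1⟩
    · rw [hn] at hgd; cases hgd
    · rw [hm] at hgd
      injection hgd with h2
      omega

lemma candB_bound (ws : List (List Char)) (s : List Char) (dp : List (Option Int)) (i : Nat)
    (h0 : dp.getD 0 none = some 0)
    (hrel : ∀ j, 1 ≤ j → j ≤ i → RelP ws s j (dp.getD j none)) :
    ∀ v ∈ ws.filterMap (candB s dp (i + 1)), 1 ≤ v := by
  intro v hv
  rw [List.mem_filterMap] at hv
  obtain ⟨w, hw, hcand⟩ := hv
  rw [candB] at hcand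
  split_ifs at hcand with hc
  · obtain ⟨hl1, hl2, -⟩ := hc
    rw [Option.map_eq_some_iff] at hcand
    obtain ⟨d, hgd, hdv⟩ := hcand
    have := dp_d_nonneg ws s dp i h0 hrel (i + 1 - w.length) d (by omega) hgd
    omega

lemma cand_equiv (ws : List (List Char)) (s : List Char) (dp : List (Option Int)) (i : Nat)
    (hi : i < s.length)
    (h0 : dp.getD 0 none = some 0)
    (hrel : ∀ j, 1 ≤ j → j ≤ i → RelP ws s j (dp.getD j none))
    (hcon : ws.contains (s.take (i + 1)) = false) :
    ∀ v, v ∈ (PySem.List.pyRange 1 (((i + 1 : Nat) : Int) + 1)).filterMap (candA ws (s.take (i + 1)))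
      ↔ v ∈ ws.filterMap (candB s dp (i + 1)) := by
  have hnotmem : s.take (i + 1) ∉ ws := by simpa using hcon
  intro v
  rw [List.mem_filterMap, List.mem_filterMap]
  constructor
  · rintro ⟨iq, hkr, hcand⟩
    rw [PySem.List.mem_pyRange_one] at hkr
    obtain ⟨lw, rfl⟩ : ∃ lw : Nat, iq = (lw : Int) := ⟨iq.toNat, by omega⟩
    have hlw1 : 1 ≤ lw := by omega
    have hlwj : lw ≤ i + 1 := by omega
    rw [candA, preA_eq s (i + 1) lw (by omega) hlwj, sufA_eq s (i + 1) lw (by omega) hlw1 hlwj]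
      at hcand
    split_ifs at hcand with hc
    · obtain ⟨hsuf, hfp⟩ := hc
      injection hcand with hv
      have hklt : lw < i + 1 := by
        rcases Nat.lt_or_ge lw (i + 1) with h | h
        · exact h
        · exfalso
          have hkeq : lw = i + 1 := by omega
          rw [hkeq] at hsuf
          simp at hsuf
          exact hnotmem (by simpa using hsuf)
      have hjl1 : 1 ≤ i + 1 - lw := by omega
      have hjl2 : i + 1 - lw ≤ i := by omega
      rcases hrel _ hjl1 hjl2 with ⟨hn, hz⟩ | ⟨m, hm, hfm, hm1⟩
      · exact absurd hz hfp
      · refine ⟨(s.drop (i + 1 - lw)).take lw, by simpa using hsuf, ?_⟩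
        have hwl : ((s.drop (i + 1 - lw)).take lw).length = lw := by
          rw [List.length_take, List.length_drop]; omega
        have hslice : PySem.List.slice s (some (((i + 1 : Nat) : Int) - ((lw : Nat) : Int)))
            (some ((i + 1 : Nat) : Int)) = (s.drop (i + 1 - lw)).take lw := by
          rw [sliceB_eq s (i + 1) lw (by omega)]
          have heq : i + 1 - (i + 1 - lw) = lw := by omega
          rw [heq]
        rw [candB, hwl, hslice, if_pos ⟨by omega, by omega, rfl⟩, hm]
        rw [hfm] at hv
        simp only [Option.map_some, Option.some.injEq]
        omega
  · rintro ⟨w, hw, hcand⟩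
    rw [candB] at hcand
    split_ifs at hcand with hc
    · obtain ⟨hl1, hl2, hsl⟩ := hc
      rw [Option.map_eq_some_iff] at hcand
      obtain ⟨d, hgd, hdv⟩ := hcand
      have hwlt : w.length < i + 1 := by
        rcases Nat.lt_or_ge w.length (i + 1) with h | h
        · exact h
        · exfalso
          have heq : w.length = i + 1 := by omega
          rw [heq] at hsl
          rw [sliceB_eq s (i + 1) (i + 1) (le_refl _)] at hsl
          simp at hsl
          exact hnotmem (hsl ▸ hw)
      have hjl1 : 1 ≤ i + 1 - w.length := by omega
      have hjl2 : i + 1 - w.length ≤ i := by omega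
      rcases hrel _ hjl1 hjl2 with ⟨hn, -⟩ | ⟨m, hm, hfm, hm1⟩
      · rw [hn] at hgd; cases hgd
      · have hmd : m = d := by rw [hm] at hgd; injection hgd
        refine ⟨((w.length : Nat) : Int), ?_, ?_⟩
        · rw [PySem.List.mem_pyRange_one]
          constructor <;> [omega; omega]
        · rw [candA, preA_eq s (i + 1) w.length (by omega) (by omega),
            sufA_eq s (i + 1) w.length (by omega) (by omega) (by omega)]
          have hsuf : (s.drop (i + 1 - w.length)).take w.length = w := by
            have heq : i + 1 - (i + 1 - w.length) = w.length := by omega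
            have h2 := hsl
            rw [sliceB_eq s (i + 1) w.length hl2, heq] at h2
            exact h2
          rw [hsuf]
          rw [if_pos ⟨by simpa using hw, by rw [hfm]; omega⟩]
          rw [hfm]
          simp only [Option.some.injEq]
          omega

lemma relStep (ws : List (List Char)) (s : List Char) (dp : List (Option Int)) (i : Nat)
    (hi : i < s.length)
    (h0 : dp.getD 0 none = some 0)
    (hrel : ∀ j, 1 ≤ j → j ≤ i → RelP ws s j (dp.getD j none)) :
    RelP ws s (i + 1) (innerB ws s dp (i + 1)) := by
  rw [RelP, innerB_eq]
  by_cases hcon : ws.contains (s.take (i + 1))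
  · right
    refine ⟨1, ?_, by rw [Fv_eq, if_pos hcon], le_refl 1⟩
    rw [List.min?_eq_some_iff]
    constructor
    · rw [List.mem_filterMap]
      refine ⟨s.take (i + 1), by simpa using hcon, ?_⟩
      have hwl : (s.take (i + 1)).length = i + 1 := by rw [List.length_take]; omega
      have hslice : PySem.List.slice s (some (((i + 1 : Nat) : Int) - ((i + 1 : Nat) : Int)))
          (some ((i + 1 : Nat) : Int)) = s.take (i + 1) := by
        rw [sliceB_eq s (i + 1) (i + 1) (le_refl _)]
        simp
      rw [candB, hwl, hslice, if_pos ⟨by omega, le_refl _, rfl⟩]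
      rw [Nat.sub_self, h0]
      simp
    · exact candB_bound ws s dp i h0 hrel
  · simp only [Bool.not_eq_true] at hcon
    have hfp : Fv ws (s.take (i + 1))
        = match (ws.filterMap (candB s dp (i + 1))).min? with | none => 0 | some m => m := by
      rw [Fv_eq]
      simp only [hcon, Bool.false_eq_true, if_false]
      have hl : (s.take (i + 1)).length = i + 1 := by rw [List.length_take]; omega
      rw [hl]
      rw [min?_congr_mem _ _ (cand_equiv ws s dp i hi h0 hrel hcon)]
    cases hm : (ws.filterMap (candB s dp (i + 1))).min? with
    | none =>
      left
      exact ⟨rfl, by rw [hfp, hm]⟩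
    | some m =>
      right
      refine ⟨m, rfl, by rw [hfp, hm], ?_⟩
      have hmem : m ∈ ws.filterMap (candB s dp (i + 1)) := (List.min?_eq_some_iff.mp hm).1
      exact candB_bound ws s dp i h0 hrel m hmem

lemma dp_inv (ws : List (List Char)) (s : List Char) :
    ∀ i, i ≤ s.length →
      ((List.range' 1 i).foldl (fun dp x => dp ++ [innerB ws s dp x]) [some 0]).length = i + 1 ∧
      ((List.range' 1 i).foldl (fun dp x => dp ++ [innerB ws s dp x]) [some 0]).getD 0 none = some 0 ∧
      ∀ j, 1 ≤ j → j ≤ i →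
        RelP ws s j (((List.range' 1 i).foldl (fun dp x => dp ++ [innerB ws s dp x]) [some 0]).getD j none) := by
  intro i
  induction i with
  | zero =>
    intro _
    refine ⟨rfl, rfl, ?_⟩
    intro j h1 h2
    omega
  | succ i ih =>
    intro hle
    have hi : i < s.length := by omega
    obtain ⟨hlen, h0, hrel⟩ := ih (by omega)
    rw [List.range'_1_concat, List.foldl_append, List.foldl_cons, List.foldl_nil]
    set dp := (List.range' 1 i).foldl (fun dp x => dp ++ [innerB ws s dp x]) [some 0] with hdp
    have h1i : 1 + i = i + 1 := by omega
    rw [h1i]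
    set x := innerB ws s dp (i + 1) with hx
    refine ⟨?_, ?_, ?_⟩
    · rw [List.length_append, hlen]
      rfl
    · rw [List.getD_append dp [x] none 0 (by rw [hlen]; omega)]
      exact h0
    · intro j hj1 hj2
      rcases Nat.lt_or_ge j (i + 1) with h | h
      · rw [List.getD_append dp [x] none j (by rw [hlen]; omega)]
        exact hrel j hj1 (by omega)
      · have hj : j = i + 1 := by omega
        subst hj
        have hnew : (dp ++ [x]).getD (i + 1) none = x := by
          rw [List.getD_eq_getElem?_getD, ← hlen, List.getElem?_concat_length]
          rfl
        rw [hnew, hx]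
        exact relStep ws s dp i hi h0 hrel

-- ===== VERDICT (by name: the statement is the Claim_ definition above) =====
theorem solution_spec : Claim_equal_solution := by
  unfold Claim_equal_solution
  intro strs t _
  unfold Spec_solution
  simp only [solution, solution_alt]
  set ws := strs.map String.toList with hws
  set s := t.toList with hs
  have hA : (findA ws (s.length + 1) s PySem.Dict.empty).1 = Fv ws s :=
    (findA_ok ws (s.length + 1) s PySem.Dict.empty (by omega)
      (fun k v h => by rw [PySem.Dict.get?_empty] at h; cases h)).1
  rw [hA]
  by_cases hn : s.length = 0
  · rw [if_pos hn]
    have hsnil : s = [] := List.length_eq_zero_iff.mp hn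
    rw [hsnil]
    by_cases hc : ws.contains ([] : List Char)
    · rw [if_pos hc]
      have h1 : Fv ws [] = 1 := by rw [Fv_eq, if_pos hc]
      rw [h1]
      norm_num
    · simp only [Bool.not_eq_true] at hc
      simp only [hc, Bool.false_eq_true, if_false]
      have h2 : Fv ws [] = 0 := by
        rw [Fv_eq]
        simp only [hc, Bool.false_eq_true, if_false]
        rfl
      rw [h2]
      norm_num
  · rw [if_neg hn]
    obtain ⟨hlen, h0, hrel⟩ := dp_inv ws s s.length (le_refl _)
    rcases hrel s.length (by omega) (le_refl _) with ⟨hnone, hz⟩ | ⟨m, hm, hf, hm1⟩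
    · rw [show (dpB ws s).getD s.length none = none from hnone]
      rw [List.take_length] at hz
      rw [hz]
      norm_num
    · rw [show (dpB ws s).getD s.length none = some m from hm]
      rw [List.take_length] at hf
      rw [hf, if_pos (by omega)]
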